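-- pv_equiv track=rewrite | github.com/todayis-sunny/Algorithm | 프로그래머스/1/135808. 과일 장수/과일 장수.py | solution
-- ===== SOURCE A (Python) =====
-- def solution(k, m, score):
--
--     if m > len(score):
--         return 0
--     answer = 0
--     score = sorted(score, reverse = True)
--     for i in range(1, len(score) // m + 1):
--         answer += score[i * m - 1] * m
--     return answer
-- ===== SOURCE B (Python) =====
-- def solution(k, m, score):
--     n = len(score)
--     if m <= 0 or m > n:
--         return 0
--     counts = {}
--     for s in score:
--         counts[s] = counts.get(s, 0) + 1
--     limit = (n // m) * m  # positions 1..limit (descending order) lie in full boxes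
--     total = 0
--     pos = 0
--     for v in sorted(counts, reverse=True):
--         nxt = pos + counts[v]
--         hi = min(nxt, limit)
--         if pos < hi:
--             total += v * m * (hi // m - pos // m)
--         pos = nxt
--     return total
-- ===== Notes on version B (the rewrite author's own statement) =====
-- stated objective: alternative
-- what changed: Instead of fully sorting all n scores and indexing every m-th element, B builds a frequency dictionary, sorts only the distinct values, and walks the runs, adding value*m times the number of box boundaries (multiples of m) falling inside each run.
import Mathlib
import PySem

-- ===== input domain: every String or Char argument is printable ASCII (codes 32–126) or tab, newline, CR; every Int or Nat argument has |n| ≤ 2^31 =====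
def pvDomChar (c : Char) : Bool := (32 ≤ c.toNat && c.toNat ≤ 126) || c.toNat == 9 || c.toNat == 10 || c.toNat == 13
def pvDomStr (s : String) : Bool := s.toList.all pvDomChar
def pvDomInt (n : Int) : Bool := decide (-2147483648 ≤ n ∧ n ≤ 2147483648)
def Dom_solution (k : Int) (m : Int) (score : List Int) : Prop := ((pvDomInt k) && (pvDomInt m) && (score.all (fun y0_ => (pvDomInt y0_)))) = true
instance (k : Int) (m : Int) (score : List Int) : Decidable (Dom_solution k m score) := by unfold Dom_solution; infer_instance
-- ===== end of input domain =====

-- B replaces the full sort of all n scores by a frequency dictionary plus a sort of the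
-- distinct values only, walking value runs and counting box boundaries inside each run.

-- ===== PORT A =====
def solution (k : Int) (m : Int) (score : List Int) : Int :=
  if (score.length : Int) < m then 0
  else
    let s := PySem.List.sorted score (fun x => x) true
    (PySem.List.pyRange 1 (PySem.Int.floordiv (s.length : Int) m + 1)).foldl
      (fun answer i => answer + PySem.List.pyGetD s (i * m - 1) 0 * m) 0

-- ===== PORT B =====
def solution_alt (k : Int) (m : Int) (score : List Int) : Int :=
  let n : Int := score.length
  if m ≤ 0 ∨ n < m then 0
  else
    let counts := score.foldl (fun d s => d.insert s (d.getD s 0 + 1)) PySem.Dict.empty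
    let limit := PySem.Int.floordiv n m * m
    ((PySem.List.sorted counts.keys (fun x => x) true).foldl
      (fun (st : Int × Int) v =>
        let nxt := st.2 + counts.getD v 0
        let hi := min nxt limit
        (if st.2 < hi then st.1 + v * m * (PySem.Int.floordiv hi m - PySem.Int.floordiv st.2 m)
         else st.1, nxt))
      (0, 0)).1

-- ===== PRECONDITION & SPEC =====
-- A raises ZeroDivisionError (len(score) // m) exactly when m = 0; only that is excluded.
def Pre_solution (k : Int) (m : Int) (score : List Int) : Prop := m ≠ 0
instance (k : Int) (m : Int) (score : List Int) : Decidable (Pre_solution k m score) := by unfold Pre_solution; infer_instance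
def pvWitness_solution : Int × Int × List Int := (4, 2, [1, 4, 2, 3])

def Spec_solution (k : Int) (m : Int) (score : List Int) (out : Int) : Prop := out = solution_alt k m score
instance (k : Int) (m : Int) (score : List Int) (out : Int) : Decidable (Spec_solution k m score out) := by unfold Spec_solution; infer_instance

-- ===== CLAIM (what is proved, stated in full; the proofs are below) =====
def Claim_equal_solution : Prop := ∀ (k : Int) (m : Int) (score : List Int), Dom_solution k m score → Pre_solution k m score → Spec_solution k m score (solution k m score)
-- ===== LEMMAS AND PROOFS =====

-- expand a list of values into runs, each value repeated its multiplicity in `score`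
def pvExpand (score : List Int) (ks : List Int) : List Int :=
  ks.flatMap (fun v => List.replicate (score.count v) v)

lemma pvExpand_count (score : List Int) (ks : List Int) (hnd : ks.Nodup) (w : Int) :
    (pvExpand score ks).count w = if w ∈ ks then score.count w else 0 := by
  induction ks with
  | nil => simp [pvExpand]
  | cons v rest ih =>
    simp only [List.nodup_cons] at hnd
    have ih' := ih hnd.2
    simp only [pvExpand, List.flatMap_cons, List.count_append, List.count_replicate] at ih' ⊢
    rw [ih']
    by_cases hw : w = v
    · subst hw
      simp [hnd.1]
    · simp [hw, Ne.symm hw]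

lemma pvExpand_perm (score : List Int) (ks : List Int) (hnd : ks.Nodup)
    (hmem : ∀ v, v ∈ ks ↔ v ∈ score) : (pvExpand score ks).Perm score := by
  rw [List.perm_iff_count]
  intro w
  rw [pvExpand_count score ks hnd w]
  by_cases hw : w ∈ ks
  · simp [hw]
  · simp [hw]
    have : w ∉ score := fun h => hw ((hmem w).mpr h)
    simp [List.count_eq_zero_of_not_mem this]

lemma pvExpand_pairwise (score : List Int) (ks : List Int)
    (hp : ks.Pairwise (fun a b => b < a)) :
    (pvExpand score ks).Pairwise (fun a b => b ≤ a) := by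
  induction ks with
  | nil => simp [pvExpand]
  | cons v rest ih =>
    rw [List.pairwise_cons] at hp
    simp only [pvExpand, List.flatMap_cons]
    rw [List.pairwise_append]
    refine ⟨List.pairwise_replicate.mpr (Or.inr le_rfl), ih hp.2, ?_⟩
    intro a ha b hb
    have hav : a = v := List.eq_of_mem_replicate ha
    have hbmem : ∃ u ∈ rest, b ∈ List.replicate (score.count u) u := by
      simpa [pvExpand, List.mem_flatMap] using hb
    obtain ⟨u, hu, hbu⟩ := hbmem
    have hbu' : b = u := List.eq_of_mem_replicate hbu
    subst hav
    subst hbu'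
    exact le_of_lt (hp.1 b hu)

-- the descending sorted list equals the expansion of the strictly descending distinct values
lemma pvExpand_eq_sorted (score : List Int) :
    pvExpand score (PySem.List.sorted (PySem.Set.ofList score) (fun x => x) true)
      = PySem.List.sorted score (fun x => x) true := by
  have hperm : (PySem.List.sorted (PySem.Set.ofList score) (fun x => x) true).Perm
      (PySem.Set.ofList score) := PySem.List.sorted_perm _ _ _
  have hnd : (PySem.List.sorted (PySem.Set.ofList score) (fun x => x) true).Nodup :=
    hperm.symm.nodup (PySem.Set.nodup_ofList score)
  have hmem : ∀ v, v ∈ PySem.List.sorted (PySem.Set.ofList score) (fun x => x) true ↔ v ∈ score := by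
    intro v
    rw [hperm.mem_iff, PySem.Set.mem_ofList]
  have hge : (PySem.List.sorted (PySem.Set.ofList score) (fun x => x) true).Pairwise
      (fun a b => b ≤ a) := PySem.List.sorted_pairwise_rev _ _
  have hgt : (PySem.List.sorted (PySem.Set.ofList score) (fun x => x) true).Pairwise
      (fun a b : Int => b < a) := by
    refine (hge.and hnd).imp ?_
    rintro a b ⟨h1, h2⟩
    exact lt_of_le_of_ne h1 (Ne.symm h2)
  have hp1 : (pvExpand score (PySem.List.sorted (PySem.Set.ofList score) (fun x => x) true)).Perm
      (PySem.List.sorted score (fun x => x) true) :=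
    (pvExpand_perm score _ hnd hmem).trans (PySem.List.sorted_perm score _ true).symm
  exact List.Perm.eq_of_pairwise (le := fun a b : Int => b ≤ a)
    (fun a b _ _ h1 h2 => le_antisymm h2 h1)
    (pvExpand_pairwise score _ hgt) (PySem.List.sorted_pairwise_rev score _) hp1

-- floordiv helpers (m > 0)
lemma pvFloordiv_mul_le (a m : Int) (hm : 0 < m) : PySem.Int.floordiv a m * m ≤ a :=
  (PySem.Int.le_floordiv_iff_mul_le hm).mp le_rfl

lemma pvFloordiv_mono {a b : Int} (m : Int) (hm : 0 < m) (h : a ≤ b) :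
    PySem.Int.floordiv a m ≤ PySem.Int.floordiv b m :=
  (PySem.Int.le_floordiv_iff_mul_le hm).mpr (le_trans (pvFloordiv_mul_le a m hm) h)

lemma pvFloordiv_mul (g m : Int) (hm : 0 < m) : PySem.Int.floordiv (g * m) m = g := by
  rw [PySem.Int.floordiv_eq_ediv_of_pos hm]
  exact Int.mul_ediv_cancel g (ne_of_gt hm)

lemma pvLt_mul_floordiv (a m : Int) (hm : 0 < m) : a < (PySem.Int.floordiv a m + 1) * m :=
  (PySem.Int.floordiv_lt_iff_lt_mul hm).mp (lt_add_one _)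

-- B's fold step with the counter lookup replaced by List.count (getD_counter)
def pvStep (score : List Int) (m : Int) (st : Int × Int) (v : Int) : Int × Int :=
  let nxt := st.2 + (score.count v : Int)
  let hi := min nxt (PySem.Int.floordiv (score.length : Int) m * m)
  (if st.2 < hi then st.1 + v * m * (PySem.Int.floordiv hi m - PySem.Int.floordiv st.2 m)
   else st.1, nxt)

-- run-walk invariant: folding B's step over a run list that expands to the tail of the
-- descending sort, starting at position pos, adds exactly the A-side sum over the
-- remaining box boundaries
lemma pvRun_fold (score : List Int) (m : Int) (hm : 0 < m) :
    ∀ (ks : List Int) (pos total : Int), 0 ≤ pos →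
      pvExpand score ks = (PySem.List.sorted score (fun x => x) true).drop pos.toNat →
      (ks.foldl (pvStep score m) (total, pos)).1
      = total + ((PySem.List.pyRange (PySem.Int.floordiv pos m + 1)
            (PySem.Int.floordiv (score.length : Int) m + 1)).map
          (fun i => PySem.List.pyGetD (PySem.List.sorted score (fun x => x) true) (i * m - 1) 0 * m)).sum := by
  intro ks
  induction ks with
  | nil =>
    intro pos total hpos h
    have hlen : (PySem.List.sorted score (fun x => x) true).length = score.length :=
      PySem.List.length_sorted _ _ _
    simp only [pvExpand, List.flatMap_nil] at h
    have hdrop := congrArg List.length h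
    simp only [List.length_nil, List.length_drop, hlen] at hdrop
    have hn : (score.length : Int) ≤ pos := by omega
    have hgp : PySem.Int.floordiv (score.length : Int) m ≤ PySem.Int.floordiv pos m :=
      pvFloordiv_mono m hm hn
    rw [PySem.List.pyRange_one_eq_nil (by omega)]
    simp
  | cons v rest ih =>
    intro pos total hpos h
    set sd := PySem.List.sorted score (fun x => x) true with hsd
    have hlen : sd.length = score.length := PySem.List.length_sorted _ _ _
    have hexp : List.replicate (score.count v) v ++ pvExpand score rest
        = sd.drop pos.toNat := by
      simpa [pvExpand, List.flatMap_cons] using h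
    have htn : (pos + (score.count v : Int)).toNat = pos.toNat + score.count v := by omega
    have hrest : pvExpand score rest = sd.drop (pos + (score.count v : Int)).toNat := by
      have h2 := congrArg (List.drop (List.replicate (score.count v) v).length) hexp
      rw [List.drop_left] at h2
      rw [h2, List.drop_drop, List.length_replicate, htn]
    have hlen2 := congrArg List.length hexp
    simp only [List.length_append, List.length_replicate, List.length_drop, hlen] at hlen2
    -- one fold step
    rw [List.foldl_cons]
    have hstep : pvStep score m (total, pos) v
        = (if pos < min (pos + (score.count v : Int)) (PySem.Int.floordiv (score.length : Int) m * m)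
           then total + v * m * (PySem.Int.floordiv (min (pos + (score.count v : Int))
                (PySem.Int.floordiv (score.length : Int) m * m)) m - PySem.Int.floordiv pos m)
           else total, pos + (score.count v : Int)) := rfl
    rw [hstep, ih (pos + (score.count v : Int)) _ (by omega) hrest]
    set n : Int := (score.length : Int) with hn
    set g := PySem.Int.floordiv n m with hg
    set c : Int := (score.count v : Int) with hc
    have hc0 : 0 ≤ c := by positivity
    have hgg : PySem.Int.floordiv (g * m) m = g := pvFloordiv_mul g m hm
    have hlimle : g * m ≤ n := pvFloordiv_mul_le n m hm
    by_cases hcz : c = 0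
    · -- empty run: nothing changes
      have hb : ¬ pos < min (pos + c) (g * m) := by omega
      simp [hcz]
    · by_cases hpl : g * m ≤ pos
      · -- past the last full box: branch not taken, both sums empty
        have hb2 : ¬ pos < min (pos + c) (g * m) := by omega
        have h1 : g ≤ PySem.Int.floordiv pos m :=
          le_of_eq_of_le hgg.symm (pvFloordiv_mono m hm hpl)
        have h2 : g ≤ PySem.Int.floordiv (pos + c) m :=
          le_of_eq_of_le hgg.symm (pvFloordiv_mono m hm (by omega))
        rw [PySem.List.pyRange_one_eq_nil (by omega), PySem.List.pyRange_one_eq_nil (by omega)]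
        simp [hb2]
      · -- the run crosses pos < g*m: branch taken
        have hpl2 : pos < g * m := lt_of_not_ge hpl
        have hbr : pos < min (pos + c) (g * m) := by omega
        set hi := min (pos + c) (g * m) with hhi
        have hi_le_lim : hi ≤ g * m := min_le_right _ _
        have hfhi_le : PySem.Int.floordiv hi m ≤ g :=
          le_of_le_of_eq (pvFloordiv_mono m hm hi_le_lim) hgg
        have hpos_le_hi : PySem.Int.floordiv pos m ≤ PySem.Int.floordiv hi m :=
          pvFloordiv_mono m hm (le_of_lt hbr)
        -- split the A-side range at the end of this run
        rw [PySem.List.pyRange_one_append (PySem.Int.floordiv pos m + 1)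
            (PySem.Int.floordiv hi m + 1) (g + 1) (by omega) (by omega)]
        rw [List.map_append, List.sum_append]
        -- every index in the first block points into this run, so its value is v
        have hconst : ∀ i ∈ PySem.List.pyRange (PySem.Int.floordiv pos m + 1)
            (PySem.Int.floordiv hi m + 1),
            PySem.List.pyGetD sd (i * m - 1) 0 * m = v * m := by
          intro i hmem
          rw [PySem.List.mem_pyRange_one] at hmem
          have hiub : i * m ≤ hi := (PySem.Int.le_floordiv_iff_mul_le hm).mp (by omega)
          have hilb : pos < i * m := lt_of_lt_of_le (pvLt_mul_floordiv pos m hm)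
            (mul_le_mul_of_nonneg_right (by omega) (le_of_lt hm))
          have hjn : i * m - 1 < n := by omega
          have hval : PySem.List.pyGetD sd (i * m - 1) 0 = v := by
            rw [PySem.List.pyGetD_eq_getElem sd 0 (by omega) (by rw [hlen, ← hn]; omega)]
            rw [List.getElem_eq_iff]
            rw [show (i * m - 1).toNat = pos.toNat + ((i * m - 1).toNat - pos.toNat) by omega]
            rw [← List.getElem?_drop, ← hexp]
            rw [List.getElem?_append_left (by simp; omega), List.getElem?_replicate]
            simp only [if_pos (show (i * m - 1).toNat - pos.toNat < score.count v by omega)]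
          rw [hval]
        rw [List.map_congr_left hconst, PySem.List.sum_map_const_int,
            PySem.List.length_pyRange_one]
        -- the rest of the range equals the sum starting from the new position
        have htail : ((PySem.List.pyRange (PySem.Int.floordiv hi m + 1) (g + 1)).map
              (fun i => PySem.List.pyGetD sd (i * m - 1) 0 * m)).sum
            = ((PySem.List.pyRange (PySem.Int.floordiv (pos + c) m + 1) (g + 1)).map
              (fun i => PySem.List.pyGetD sd (i * m - 1) 0 * m)).sum := by
          rcases le_or_gt (pos + c) (g * m) with hle | hgt
          · rw [show hi = pos + c from min_eq_left hle]
          · have h2 : g ≤ PySem.Int.floordiv (pos + c) m :=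
              le_of_eq_of_le hgg.symm (pvFloordiv_mono m hm (le_of_lt hgt))
            rw [show hi = g * m from min_eq_right (by omega), hgg,
                PySem.List.pyRange_one_eq_nil (by omega),
                PySem.List.pyRange_one_eq_nil (by omega)]
        rw [htail]
        have hcast : ((PySem.Int.floordiv hi m + 1 - (PySem.Int.floordiv pos m + 1)).toNat : Int)
            = PySem.Int.floordiv hi m - PySem.Int.floordiv pos m := by omega
        rw [if_pos hbr, hcast]
        ring

-- ===== VERDICT (by name: the statement is the Claim_ definition above) =====
theorem solution_spec : Claim_equal_solution := by
  intro k m score hdom hpre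
  unfold Spec_solution solution solution_alt Pre_solution at *
  by_cases h1 : (score.length : Int) < m
  · rw [if_pos h1, if_pos (Or.inr h1)]
  · rw [if_neg h1]
    by_cases hm : m ≤ 0
    · -- m < 0: A's range is empty, B's guard fires; both return 0
      rw [if_pos (Or.inl hm)]
      have hmneg : m < 0 := lt_of_le_of_ne hm hpre
      have hfd : PySem.Int.floordiv ((PySem.List.sorted score (fun x => x) true).length : Int) m ≤ 0 := by
        show Int.fdiv _ _ ≤ 0
        rw [Int.fdiv_eq_ediv]
        have hdv : ((PySem.List.sorted score (fun x => x) true).length : Int) / m ≤ 0 :=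
          Int.ediv_nonpos_of_nonneg_of_nonpos (by positivity) (le_of_lt hmneg)
        split_ifs <;> omega
      simp only [PySem.List.pyRange_one_eq_nil (show PySem.Int.floordiv
        ((PySem.List.sorted score (fun x => x) true).length : Int) m + 1 ≤ 1 by omega),
        List.foldl_nil]
    · -- main case 0 < m ≤ len(score)
      have hm' : 0 < m := lt_of_not_ge hm
      rw [if_neg (by omega)]
      simp only [PySem.Dict.foldl_insert_getD_add_one_eq_counter, PySem.Dict.keys_counter]
      have hfn : (fun (st : Int × Int) v =>
          let nxt := st.2 + (PySem.Dict.counter score).getD v 0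
          let hi := min nxt (PySem.Int.floordiv (score.length : Int) m * m)
          (if st.2 < hi then st.1 + v * m * (PySem.Int.floordiv hi m - PySem.Int.floordiv st.2 m)
           else st.1, nxt)) = pvStep score m := by
        funext st v
        simp [pvStep, PySem.Dict.getD_counter]
      rw [hfn]
      rw [pvRun_fold score m hm' _ 0 0 le_rfl (by simpa using pvExpand_eq_sorted score)]
      rw [PySem.List.foldl_add, PySem.List.length_sorted]
      have h0 : PySem.Int.floordiv 0 m = 0 := Int.zero_fdiv m
      rw [h0]
      norm_num
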